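-- pv_equiv track=rewrite | github.com/FanchenBao/leetcode | Contest_273/LeetCode_2122.py | recoverArray
-- ===== SOURCE A (Python) =====
-- from typing import List
--
-- def recoverArray(nums: List[int]) -> List[int]:
--     """TLE
--
--     This method works, but too slow.
--     """
--     nums.sort()
--     N = len(nums) // 2
--
--     def helper(lo: int, hi: int, idx: int) -> bool:
--         if idx == 2 * N:
--             return True
--         pos_lo = nums[idx] + k
--         pos_hi = nums[idx] - k
--         if lo < N and pos_lo > 0 and res[lo] == pos_lo and helper(lo + 1, hi, idx + 1):
--             return True
--         if hi < N and pos_hi > 0 and res[hi] == pos_hi and helper(lo, hi + 1, idx + 1):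
--             return True
--         if lo < N and not res[lo] and pos_lo > 0:
--             res[lo] = pos_lo
--             if helper(lo + 1, hi, idx + 1):
--                 return True
--             res[lo] = 0
--         if hi < N and not res[hi] and pos_hi > 0:
--             res[hi] = pos_hi
--             if helper(lo, hi + 1, idx + 1):
--                 return True
--             res[hi] = 0
--         return False
--
--
--     for i in range(1, 2 * N):
--         k, r = divmod(nums[i] - nums[0], 2)  # obtain k
--         if r == 0 and k > 0:
--             res = [0] * N
--             res[0] = nums[0] + k
--             if helper(1, 0, 1):
--                 return res
-- ===== SOURCE B (Python) =====
-- def recoverArray(nums):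
--     """Per candidate k: one linear greedy pass matching each forced low with its
--     high through a pending queue, instead of exponential backtracking.
--     Like A, this sorts nums in place."""
--     nums.sort()
--     n2 = 2 * (len(nums) // 2)
--     for i in range(1, n2):
--         k, r = divmod(nums[i] - nums[0], 2)
--         if r == 0 and k > 0 and nums[0] + k > 0:
--             ans = _greedy(nums, n2, k)
--             if ans is not None:
--                 return ans
--     return None
--
--
-- def _greedy(nums, n2, k):
--     first = nums[0] + k
--     pend = [first]
--     out = [first]
--     for x in nums[1:n2]:
--         if pend and pend[0] == x - k:
--             pend.pop(0)
--         elif x + k > 0: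
--             v = x + k
--             pend.append(v)
--             out.append(v)
--         else:
--             return None
--     return out if not pend else None
-- ===== Notes on version B (the rewrite author's own statement) =====
-- stated objective: faster
-- what changed: Per candidate k, A's exponential recursive backtracking over the res array is replaced by a single linear greedy pass with a pending queue that matches each forced low value with its +2k partner, making the whole algorithm O(n^2) instead of worst-case exponential.
-- outside the precondition, e.g. on recoverArray([-1, 1, 2, 3]): A returns [1, 2], B returns None; on recoverArray([-2, 2, 3, 7]): A returns None, B returns None
import Mathlib
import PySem

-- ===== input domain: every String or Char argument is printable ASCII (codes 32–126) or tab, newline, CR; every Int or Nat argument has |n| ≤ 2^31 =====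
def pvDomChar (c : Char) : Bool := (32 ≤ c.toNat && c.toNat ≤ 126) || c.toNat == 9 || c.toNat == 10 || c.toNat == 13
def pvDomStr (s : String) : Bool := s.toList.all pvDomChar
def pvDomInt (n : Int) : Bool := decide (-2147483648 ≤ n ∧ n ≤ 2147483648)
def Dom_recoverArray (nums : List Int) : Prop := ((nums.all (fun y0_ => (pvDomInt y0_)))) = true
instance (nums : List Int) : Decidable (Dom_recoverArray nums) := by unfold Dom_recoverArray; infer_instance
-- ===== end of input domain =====

-- B replaces A's exponential backtracking by one linear greedy queue pass per candidate k.
-- Both A and B sort nums in place in Python; the equivalence proved here is about the return value.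

-- ===== PORT A =====
-- Port of A's recursive `helper`, with `res` threaded functionally (Python mutates and
-- rolls back `res`; returning the successful `res` is the same value A returns).
-- `fuel` only bounds the recursion depth; every reachable call has idx ≤ 2*N, so with
-- initial fuel 2*N the `0`-case is never taken. Indices idx/lo/hi are provably in range
-- where Python reads them, so `List.getD` is exact there.
def pvHelperA (s : List Int) (N : Nat) (k : Int) : Nat → List Int → Nat → Nat → Nat → Option (List Int)
  | 0, res, _, _, idx => if idx = 2*N then some res else none
  | fuel+1, res, lo, hi, idx =>
    if idx = 2*N then some res
    else
      let x := s.getD idx 0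
      let posLo := x + k
      let posHi := x - k
      let t1 : Option (List Int) :=
        if lo < N ∧ 0 < posLo ∧ res.getD lo 0 = posLo then
          pvHelperA s N k fuel res (lo+1) hi (idx+1) else none
      match t1 with
      | some r => some r
      | none =>
        let t2 : Option (List Int) :=
          if hi < N ∧ 0 < posHi ∧ res.getD hi 0 = posHi then
            pvHelperA s N k fuel res lo (hi+1) (idx+1) else none
        match t2 with
        | some r => some r
        | none =>
          let t3 : Option (List Int) :=
            if lo < N ∧ res.getD lo 0 = 0 ∧ 0 < posLo then
              pvHelperA s N k fuel (res.set lo posLo) (lo+1) hi (idx+1) else none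
          match t3 with
          | some r => some r
          | none =>
            if hi < N ∧ res.getD hi 0 = 0 ∧ 0 < posHi then
              pvHelperA s N k fuel (res.set hi posHi) lo (hi+1) (idx+1) else none

-- Port of A's `for i in range(1, 2*N)` candidate loop.
def pvLoopA (s : List Int) (N : Nat) : List Int → Option (List Int)
  | [] => none
  | i :: rest =>
    let d := PySem.List.pyGetD s i 0 - PySem.List.pyGetD s 0 0
    let k := PySem.Int.floordiv d 2
    let r := PySem.Int.mod d 2
    if r = 0 ∧ 0 < k then
      match pvHelperA s N k (2*N) (((List.replicate N (0:Int)).set 0 (PySem.List.pyGetD s 0 0 + k))) 1 0 1 with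
      | some out => some out
      | none => pvLoopA s N rest
    else pvLoopA s N rest

def recoverArray (nums : List Int) : Option (List Int) :=
  let s := PySem.List.sorted nums (fun x => x) false
  let N := s.length / 2
  pvLoopA s N (PySem.List.pyRange 1 ((2*N : Nat) : Int) 1)

-- ===== PORT B =====
-- Port of Source B's `_greedy`: pend is the queue of recovered values still awaiting their
-- `+k` partner, out the recovered array so far.
def pvGreedyB (k : Int) : List Int → List Int → List Int → Option (List Int)
  | pend, out, [] => if pend = [] then some out else none
  | pend, out, x :: l =>
    match pend with
    | p :: pt =>
      if p = x - k then pvGreedyB k pt out l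
      else if 0 < x + k then pvGreedyB k (p :: (pt ++ [x + k])) (out ++ [x + k]) l
      else none
    | [] => if 0 < x + k then pvGreedyB k [x + k] (out ++ [x + k]) l else none

-- Port of Source B's candidate loop.
def pvLoopB (s : List Int) (n2 : Nat) : List Int → Option (List Int)
  | [] => none
  | i :: rest =>
    let d := PySem.List.pyGetD s i 0 - PySem.List.pyGetD s 0 0
    let k := PySem.Int.floordiv d 2
    let r := PySem.Int.mod d 2
    if r = 0 ∧ 0 < k ∧ 0 < PySem.List.pyGetD s 0 0 + k then
      -- nums[1:n2] = (s.take n2).drop 1 (1 and n2 are in range: n2 ≤ len s)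
      match pvGreedyB k [PySem.List.pyGetD s 0 0 + k] [PySem.List.pyGetD s 0 0 + k] ((s.take n2).drop 1) with
      | some out => some out
      | none => pvLoopB s n2 rest
    else pvLoopB s n2 rest

def recoverArray_alt (nums : List Int) : Option (List Int) :=
  let s := PySem.List.sorted nums (fun x => x) false
  let n2 := 2 * (s.length / 2)
  pvLoopB s n2 (PySem.List.pyRange 1 ((n2 : Nat) : Int) 1)

-- ===== PRECONDITION & SPEC =====
-- Pre_ excludes only lists outside the problem's positive-array domain that contain a
-- negative minimum m together with -m: there the candidate k = -m makes A's first result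
-- slot zero, which A's falsiness test on a slot treats as an empty slot, so
-- A can return an array that leaves the minimum unpaired, while B reports no solution.
def Pre_recoverArray (nums : List Int) : Prop :=
  ∀ x ∈ nums, x < 0 → (∀ y ∈ nums, x ≤ y) → (-x) ∉ nums
instance (nums : List Int) : Decidable (Pre_recoverArray nums) := by
  unfold Pre_recoverArray; infer_instance

def pvWitness_recoverArray : List Int := [2, 6, 4, 8]

def Spec_recoverArray (nums : List Int) (out : Option (List Int)) : Prop := out = recoverArray_alt nums
instance (nums : List Int) (out : Option (List Int)) : Decidable (Spec_recoverArray nums out) := by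
  unfold Spec_recoverArray; infer_instance

-- ===== CLAIM (what is proved, stated in full; the proofs are below) =====
def Claim_equal_recoverArray : Prop :=
  ∀ (nums : List Int), Dom_recoverArray nums → Pre_recoverArray nums →
    Spec_recoverArray nums (recoverArray nums)

-- ===== LEMMAS AND PROOFS =====

lemma pvGB_none_of_long (k : Int) :
    ∀ (l pend out : List Int), l.length < pend.length → pvGreedyB k pend out l = none := by
  intro l
  induction l with
  | nil =>
    intro pend out h
    cases pend with
    | nil => simp at h
    | cons p pt => simp [pvGreedyB]
  | cons x l ih =>
    intro pend out h
    cases pend with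
    | nil => simp at h
    | cons p pt =>
      simp only [pvGreedyB]
      by_cases h1 : p = x - k
      · rw [if_pos h1]
        apply ih
        simp at h ⊢; omega
      · rw [if_neg h1]
        by_cases h2 : 0 < x + k
        · rw [if_pos h2]
          apply ih
          simp at h ⊢; omega
        · rw [if_neg h2]
lemma pvSet_getD_ne (l : List Int) (i j : Nat) (v d : Int) (h : i ≠ j) :
    (l.set i v).getD j d = l.getD j d := by
  simp [List.getD_eq_getElem?_getD, List.getElem?_set_ne h]

lemma pvSet_getD_self (l : List Int) (i : Nat) (v d : Int) (h : i < l.length) :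
    (l.set i v).getD i d = v := by
  simp [List.getD_eq_getElem?_getD, h]

lemma pvS_mono (s : List Int) (hs : s.Pairwise (· ≤ ·)) (i j : Nat) (hij : i ≤ j)
    (hj : j < s.length) : s.getD i 0 ≤ s.getD j 0 := by
  rcases Nat.eq_or_lt_of_le hij with rfl | h
  · exact le_refl _
  · rw [List.getD_eq_getElem?_getD, List.getD_eq_getElem?_getD,
      List.getElem?_eq_getElem (by omega), List.getElem?_eq_getElem hj]
    simpa using List.pairwise_iff_getElem.1 hs i j (by omega) hj h

lemma pvHA_neg (s : List Int) (N : Nat) (k : Int) :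
    ∀ (fuel : Nat) (res : List Int) (lo idx : Nat),
      res.length = N → 1 ≤ N → 1 ≤ lo → lo ≤ N → idx = lo →
      res.getD 0 0 < 0 → (∀ m, lo ≤ m → m < N → res.getD m 0 = 0) →
      pvHelperA s N k fuel res lo 0 idx = none := by
  intro fuel
  induction fuel with
  | zero =>
    intro res lo idx hlen hN hlo1 hloN hidx h0 hz
    simp only [pvHelperA]
    rw [if_neg (by omega)]
  | succ fuel ih =>
    intro res lo idx hlen hN hlo1 hloN hidx h0 hz
    have hidx2 : idx ≠ 2*N := by omega
    have hg1 : ¬(lo < N ∧ 0 < s.getD idx 0 + k ∧ res.getD lo 0 = s.getD idx 0 + k) := by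
      rintro ⟨h1, h2, h3⟩
      rw [hz lo (le_refl _) h1] at h3; omega
    have hg2 : ¬((0:Nat) < N ∧ 0 < s.getD idx 0 - k ∧ res.getD 0 0 = s.getD idx 0 - k) := by
      rintro ⟨_, h2, h3⟩; omega
    have hg4 : ¬((0:Nat) < N ∧ res.getD 0 0 = 0 ∧ 0 < s.getD idx 0 - k) := by
      rintro ⟨_, h2, _⟩; omega
    simp only [pvHelperA]
    rw [if_neg hidx2, if_neg hg1, if_neg hg2, if_neg hg4]
    by_cases hg3 : lo < N ∧ res.getD lo 0 = 0 ∧ 0 < s.getD idx 0 + k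
    · rw [if_pos hg3,
        ih (res.set lo (s.getD idx 0 + k)) (lo+1) (idx+1) (by simp [hlen]) hN (by omega)
          (by omega) (by omega)
          (by rw [pvSet_getD_ne _ _ _ _ _ (by omega)]; exact h0)
          (fun m hm1 hm2 => by
            rw [pvSet_getD_ne _ _ _ _ _ (by omega)]; exact hz m (by omega) hm2)]
    · rw [if_neg hg3]

lemma pvHA_bad (s : List Int) (N : Nat) (k : Int) (hs : s.Pairwise (· ≤ ·)) (hk : 0 < k)
    (h2N : 2*N ≤ s.length) :
    ∀ (fuel : Nat) (res : List Int) (lo hi idx : Nat),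
      res.length = N → lo < hi → hi ≤ N → idx = lo + hi →
      (∀ m, lo ≤ m → m < hi →
        0 < res.getD m 0 ∧ ∃ j, j < idx ∧ j < 2*N ∧ res.getD m 0 = s.getD j 0 - k) →
      (∀ m, hi ≤ m → m < N → res.getD m 0 = 0) →
      pvHelperA s N k fuel res lo hi idx = none := by
  intro fuel
  induction fuel with
  | zero =>
    intro res lo hi idx hlen hlh hhN hidx hb hz
    simp only [pvHelperA]
    rw [if_neg (by omega)]
  | succ fuel ih =>
    intro res lo hi idx hlen hlh hhN hidx hb hz
    have hidxlt : idx < 2*N := by omega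
    have hg1 : ¬(lo < N ∧ 0 < s.getD idx 0 + k ∧ res.getD lo 0 = s.getD idx 0 + k) := by
      rintro ⟨h1, h2, h3⟩
      obtain ⟨hpos, j, hj1, hj2, hjeq⟩ := hb lo (le_refl _) hlh
      have := pvS_mono s hs j idx (by omega) (by omega)
      omega
    have hg2 : ¬(hi < N ∧ 0 < s.getD idx 0 - k ∧ res.getD hi 0 = s.getD idx 0 - k) := by
      rintro ⟨h1, h2, h3⟩
      rw [hz hi (le_refl _) h1] at h3; omega
    have hg3 : ¬(lo < N ∧ res.getD lo 0 = 0 ∧ 0 < s.getD idx 0 + k) := by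
      rintro ⟨h1, h2, _⟩
      obtain ⟨hpos, _⟩ := hb lo (le_refl _) hlh
      omega
    simp only [pvHelperA]
    rw [if_neg (by omega), if_neg hg1, if_neg hg2, if_neg hg3]
    by_cases hg4 : hi < N ∧ res.getD hi 0 = 0 ∧ 0 < s.getD idx 0 - k
    · rw [if_pos hg4,
        ih (res.set hi (s.getD idx 0 - k)) lo (hi+1) (idx+1) (by simp [hlen]) (by omega)
          (by omega) (by omega)
          (fun m hm1 hm2 => by
            rcases Nat.lt_or_ge m hi with hmh | hmh
            · rw [pvSet_getD_ne _ _ _ _ _ (by omega)]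
              obtain ⟨hpos, j, hj1, hj2, hjeq⟩ := hb m hm1 hmh
              exact ⟨hpos, j, by omega, hj2, hjeq⟩
            · have hmeq : m = hi := by omega
              subst hmeq
              rw [pvSet_getD_self _ _ _ _ (by omega)]
              exact ⟨by omega, idx, by omega, by omega, rfl⟩)
          (fun m hm1 hm2 => by
            rw [pvSet_getD_ne _ _ _ _ _ (by omega)]; exact hz m (by omega) hm2)]
    · rw [if_neg hg4]
lemma pvGB_out (k : Int) :
    ∀ (l pend out : List Int), pvGreedyB k pend out l = (pvGreedyB k pend [] l).map (out ++ ·) := by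
  intro l
  induction l with
  | nil =>
    intro pend out
    cases pend with
    | nil => simp [pvGreedyB]
    | cons p pt => simp [pvGreedyB]
  | cons x l ih =>
    intro pend out
    cases pend with
    | nil =>
      simp only [pvGreedyB, List.nil_append]
      by_cases h2 : 0 < x + k
      · simp only [if_pos h2]
        rw [ih [x+k] (out ++ [x+k]), ih [x+k] [x+k]]
        cases pvGreedyB k [x + k] [] l <;> simp
      · simp only [if_neg h2, Option.map_none]
    | cons p pt =>
      simp only [pvGreedyB, List.nil_append]
      by_cases h1 : p = x - k
      · simp only [if_pos h1]
        exact ih pt out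
      · simp only [if_neg h1]
        by_cases h2 : 0 < x + k
        · simp only [if_pos h2]
          rw [ih (p :: (pt ++ [x+k])) (out ++ [x+k]), ih (p :: (pt ++ [x+k])) [x+k]]
          cases pvGreedyB k (p :: (pt ++ [x+k])) [] l <;> simp
        · simp only [if_neg h2, Option.map_none]

lemma pvGB_isSome_out (k : Int) (l pend out out' : List Int) :
    (pvGreedyB k pend out l).isSome = (pvGreedyB k pend out' l).isSome := by
  rw [pvGB_out k l pend out, pvGB_out k l pend out']
  cases pvGreedyB k pend [] l <;> simp

lemma pvPW_append_singleton {p : List Int} {c : Int} (h : p.Pairwise (· ≤ ·))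
    (hb : ∀ v ∈ p, v ≤ c) : (p ++ [c]).Pairwise (· ≤ ·) := by
  refine List.pairwise_append.2 ⟨h, by simp, ?_⟩
  intro a ha b hb'
  simp at hb'
  subst hb'
  exact hb a ha

lemma pvRep_shift (Q : List Int) (c : Int) (h : ∀ v ∈ Q, v = c) : c :: Q = Q ++ [c] := by
  have hrep : Q = List.replicate Q.length c := List.eq_replicate_of_mem h
  rw [hrep, ← List.replicate_succ, List.replicate_succ']

lemma pvGB_sim (k : Int) (hk : 0 < k) :
    ∀ (l : List Int), l.Pairwise (· ≤ ·) →
    ∀ (a : Int) (Q₁ Q₂ out out' : List Int),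
      (a :: (Q₁ ++ (a + 2*k) :: Q₂)).Pairwise (· ≤ ·) →
      (∀ v ∈ a :: (Q₁ ++ (a + 2*k) :: Q₂), 0 < v) →
      (∀ v ∈ a :: (Q₁ ++ (a + 2*k) :: Q₂), ∀ y ∈ l, v ≤ y + k) →
      (pvGreedyB k (a :: (Q₁ ++ (a + 2*k) :: Q₂)) out l).isSome = true →
      (pvGreedyB k (Q₁ ++ Q₂) out' l).isSome = true := by
  intro l
  induction l with
  | nil =>
    intro _ a Q₁ Q₂ out out' _ _ _ hsome
    simp [pvGreedyB] at hsome
  | cons x l ih =>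
    intro hls a Q₁ Q₂ out out' hpw hpos hbd hsome
    have hlps : l.Pairwise (· ≤ ·) := (List.pairwise_cons.1 hls).2
    have hxle : ∀ y ∈ l, x ≤ y := (List.pairwise_cons.1 hls).1
    have ha_pos : 0 < a := hpos a (by simp)
    have hbd' : ∀ v ∈ a :: (Q₁ ++ (a + 2*k) :: Q₂), ∀ y ∈ l, v ≤ y + k := by
      intro v hv y hy; exact hbd v hv y (by simp [hy])
    have hsub : (Q₁ ++ Q₂).Sublist (a :: (Q₁ ++ (a + 2*k) :: Q₂)) := by
      refine List.Sublist.trans ?_ (List.sublist_cons_self _ _)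
      exact List.Sublist.append_left (List.sublist_cons_self _ _) Q₁
    have hpwT : (Q₁ ++ Q₂).Pairwise (· ≤ ·) := hpw.sublist hsub
    have hposT : ∀ v ∈ Q₁ ++ Q₂, 0 < v := fun v hv => hpos v (hsub.subset hv)
    have hble : ∀ v ∈ a :: (Q₁ ++ (a + 2*k) :: Q₂), v ≤ x + k := by
      intro v hv; exact hbd v hv x (by simp)
    by_cases hxa : a = x - k
    · -- the pending front a is matched by x in the push-run; Q₂ is forced to be all a+2k
      have hQ₂ : ∀ v ∈ Q₂, v = a + 2*k := by
        intro v hv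
        have h1 : v ≤ x + k := hble v (by simp [hv])
        have h2 : a + 2*k ≤ v := by
          have hpw2 : ((a + 2*k) :: Q₂).Pairwise (· ≤ ·) :=
            ((List.pairwise_cons.1 hpw).2).sublist (List.sublist_append_right _ _)
          exact (List.pairwise_cons.1 hpw2).1 v hv
        omega
      have hshift : (a + 2*k) :: Q₂ = Q₂ ++ [a + 2*k] := pvRep_shift _ _ hQ₂
      have hsome' : (pvGreedyB k (Q₁ ++ (a + 2*k) :: Q₂) out l).isSome = true := by
        have h := hsome
        simp only [pvGreedyB, if_pos hxa] at h
        exact h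
      cases hQ1 : Q₁ with
      | nil =>
        subst hQ1
        rw [List.nil_append] at hsome'
        rw [List.nil_append]
        have hgoal : pvGreedyB k Q₂ out' (x :: l)
            = pvGreedyB k (Q₂ ++ [x + k]) (out' ++ [x + k]) l := by
          cases hQ2 : Q₂ with
          | nil =>
            simp only [pvGreedyB]
            rw [if_pos (show 0 < x + k by omega)]
            rfl
          | cons c Q₂t =>
            have hc : c = a + 2*k := hQ₂ c (by simp [hQ2])
            simp only [pvGreedyB]
            rw [if_neg (show ¬ (c = x - k) by omega), if_pos (show 0 < x + k by omega)]
            rfl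
        rw [hgoal, show x + k = a + 2*k by omega, ← hshift]
        rw [pvGB_isSome_out k l _ _ out]
        exact hsome'
      | cons q Q₁t =>
        subst hQ1
        have hq_ge : a ≤ q := (List.pairwise_cons.1 hpw).1 q (by simp)
        by_cases hqa : q = a
        · have htgt : pvGreedyB k ((q :: Q₁t) ++ Q₂) out' (x :: l)
              = pvGreedyB k (Q₁t ++ Q₂) out' l := by
            rw [List.cons_append]
            simp only [pvGreedyB]
            rw [if_pos (show q = x - k by omega)]
          rw [htgt]
          refine ih hlps a Q₁t Q₂ out out' ?_ ?_ ?_ ?_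
          · have h2 := (List.pairwise_cons.1 hpw).2
            rw [List.cons_append] at h2
            rw [hqa] at h2
            exact h2
          · intro v hv
            apply hpos
            simp only [List.mem_cons, List.mem_append, List.mem_cons] at hv ⊢
            tauto
          · intro v hv y hy
            refine hbd' v ?_ y hy
            simp only [List.mem_cons, List.mem_append, List.mem_cons] at hv ⊢
            tauto
          · have h := hsome'
            rw [List.cons_append, hqa] at h
            exact h
        · have htgt : pvGreedyB k ((q :: Q₁t) ++ Q₂) out' (x :: l)
              = pvGreedyB k (q :: ((Q₁t ++ Q₂) ++ [x + k])) (out' ++ [x + k]) l := by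
            rw [List.cons_append]
            simp only [pvGreedyB]
            rw [if_neg (show ¬ (q = x - k) by omega), if_pos (show 0 < x + k by omega)]
          rw [htgt]
          have hqueues : q :: ((Q₁t ++ Q₂) ++ [x + k]) = (q :: Q₁t) ++ (a + 2*k) :: Q₂ := by
            rw [show x + k = a + 2*k by omega, List.append_assoc, ← hshift]
            rfl
          rw [hqueues, pvGB_isSome_out k l _ _ out]
          exact hsome'
    · -- a ≠ x-k : the push-run pushes x+k
      have hstep : pvGreedyB k (a :: (Q₁ ++ (a + 2*k) :: Q₂)) out (x :: l)
          = if 0 < x + k then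
              pvGreedyB k (a :: ((Q₁ ++ (a + 2*k) :: Q₂) ++ [x + k])) (out ++ [x + k]) l
            else none := by
        simp only [pvGreedyB]
        rw [if_neg hxa]
      by_cases hpk : 0 < x + k
      · rw [hstep, if_pos hpk] at hsome
        have hform : a :: ((Q₁ ++ (a + 2*k) :: Q₂) ++ [x + k])
            = a :: (Q₁ ++ (a + 2*k) :: (Q₂ ++ [x + k])) := by simp
        rw [hform] at hsome
        have hkey : ∀ oo, (pvGreedyB k (Q₁ ++ (Q₂ ++ [x + k])) oo l).isSome = true := by
          intro oo
          refine ih hlps a Q₁ (Q₂ ++ [x+k]) (out ++ [x+k]) oo ?_ ?_ ?_ hsome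
          · have h : ((a :: (Q₁ ++ (a + 2*k) :: Q₂)) ++ [x+k]).Pairwise (· ≤ ·) :=
              pvPW_append_singleton hpw hble
            have h2 : (a :: (Q₁ ++ (a + 2*k) :: Q₂)) ++ [x+k]
                = a :: (Q₁ ++ (a + 2*k) :: (Q₂ ++ [x + k])) := by simp
            rw [h2] at h
            exact h
          · intro v hv
            simp only [List.mem_cons, List.mem_append, List.mem_cons] at hv
            rcases hv with h | h | h | h
            · exact hpos v (by simp [h])
            · exact hpos v (by simp [List.mem_append, h])
            · exact hpos v (by simp [List.mem_append, h])
            · rcases h with h' | h' | h'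
              · exact hpos v (by simp [List.mem_append, List.mem_cons]; tauto)
              · omega
              · simp at h'
          · intro v hv y hy
            simp only [List.mem_cons, List.mem_append, List.mem_cons] at hv
            rcases hv with h | h | h | h
            · exact hbd' v (by simp [h]) y hy
            · exact hbd' v (by simp [List.mem_append, h]) y hy
            · exact hbd' v (by simp [List.mem_append, h]) y hy
            · rcases h with h' | h' | h'
              · exact hbd' v (by simp [List.mem_append, List.mem_cons]; tauto) y hy
              · have := hxle y hy; omega
              · simp at h'
        cases hT : Q₁ ++ Q₂ with
        | nil =>
          have h1 : Q₁ = [] := by cases Q₁ <;> simp_all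
          have h2 : Q₂ = [] := by rw [h1] at hT; simpa using hT
          have htgt : pvGreedyB k ([] : List Int) out' (x :: l)
              = pvGreedyB k [x + k] (out' ++ [x + k]) l := by
            simp only [pvGreedyB]
            rw [if_pos hpk]
          rw [htgt]
          have h3 := hkey (out' ++ [x+k])
          rw [h1, h2] at h3
          simpa using h3
        | cons f T =>
          have hkeyT : ∀ oo, (pvGreedyB k (f :: (T ++ [x + k])) oo l).isSome = true := by
            intro oo
            have h3 := hkey oo
            rw [← List.append_assoc, hT] at h3
            simpa using h3
          by_cases hf : f = x - k
          · have htgt : pvGreedyB k (f :: T) out' (x :: l) = pvGreedyB k T out' l := by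
              simp only [pvGreedyB]
              rw [if_pos hf]
            rw [htgt]
            have hfx : f + 2*k = x + k := by omega
            have hmemFT : ∀ v ∈ f :: T, v ∈ Q₁ ++ Q₂ := by rw [hT]; intro v hv; exact hv
            have hinv1 : (f :: (T ++ (f + 2*k) :: [])).Pairwise (· ≤ ·) := by
              have h : ((Q₁ ++ Q₂) ++ [x+k]).Pairwise (· ≤ ·) :=
                pvPW_append_singleton hpwT (fun v hv => hble v (hsub.subset hv))
              rw [hT] at h
              rw [hfx]
              simpa using h
            have hkey2 := hkeyT out
            have hpend2 : f :: (T ++ [x + k]) = f :: (T ++ (f + 2*k) :: []) := by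
              rw [hfx]
            rw [hpend2] at hkey2
            have h4 := ih hlps f T [] out out' hinv1 ?_ ?_ hkey2
            · simpa using h4
            · intro v hv
              simp only [List.mem_cons, List.mem_append, List.mem_cons] at hv
              rcases hv with h | h | h | h
              · exact hposT v (hmemFT v (by simp [h]))
              · exact hposT v (hmemFT v (by simp [h]))
              · omega
              · simp at h
            · intro v hv y hy
              simp only [List.mem_cons, List.mem_append, List.mem_cons] at hv
              rcases hv with h | h | h | h
              · exact hbd' v (hsub.subset (hmemFT v (by simp [h]))) y hy
              · exact hbd' v (hsub.subset (hmemFT v (by simp [h]))) y hy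
              · have := hxle y hy; omega
              · simp at h
          · have htgt : pvGreedyB k (f :: T) out' (x :: l)
                = pvGreedyB k (f :: (T ++ [x + k])) (out' ++ [x + k]) l := by
              simp only [pvGreedyB]
              rw [if_neg hf, if_pos hpk]
            rw [htgt]
            exact hkeyT (out' ++ [x+k])
      · rw [hstep, if_neg hpk] at hsome
        simp at hsome
lemma pvResZero (R : List Int) (N m : Nat) (h : R.length ≤ m) :
    (R ++ List.replicate (N - R.length) (0:Int)).getD m 0 = 0 := by
  rw [List.getD_eq_getElem?_getD, List.getElem?_append_right h]
  rcases Nat.lt_or_ge (m - R.length) (N - R.length) with h2 | h2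
  · simp [h2]
  · rw [List.getElem?_eq_none_iff.2 (by simpa using h2)]
    rfl

lemma pvResR (R : List Int) (N m : Nat) (h : m < R.length) :
    (R ++ List.replicate (N - R.length) (0:Int)).getD m 0 = R.getD m 0 := by
  rw [List.getD_eq_getElem?_getD, List.getD_eq_getElem?_getD, List.getElem?_append_left h]

lemma pvResSet (R : List Int) (N : Nat) (hN : R.length < N) (v : Int) :
    (R ++ List.replicate (N - R.length) 0).set R.length v
      = (R ++ [v]) ++ List.replicate (N - (R.length + 1)) (0:Int) := by
  have h1 : N - R.length = (N - (R.length + 1)) + 1 := by omega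
  rw [List.set_append_right _ _ (le_refl _), Nat.sub_self, h1, List.replicate_succ]
  simp [List.append_assoc]

lemma pvResLen (R : List Int) (N : Nat) (h : R.length ≤ N) :
    (R ++ List.replicate (N - R.length) (0:Int)).length = N := by
  simp; omega

lemma pvTake_cons (s : List Int) (n i : Nat) (h : i < n) (h2 : n ≤ s.length) :
    (s.take n).drop i = s.getD i 0 :: (s.take n).drop (i+1) := by
  rw [List.drop_eq_getElem_cons (by simp; omega)]
  congr 1
  rw [List.getElem_take, List.getD_eq_getElem?_getD, List.getElem?_eq_getElem (by omega)]
  rfl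

lemma pvDT_sorted (s : List Int) (hs : s.Pairwise (· ≤ ·)) (n i : Nat) :
    ((s.take n).drop i).Pairwise (· ≤ ·) :=
  hs.sublist (((s.take n).drop_sublist i).trans (s.take_sublist n))

lemma pvDT_len (s : List Int) (n i : Nat) (h2 : n ≤ s.length) :
    ((s.take n).drop i).length = n - i := by
  simp; omega

lemma pvHead_le (s : List Int) (hs : s.Pairwise (· ≤ ·)) (n i : Nat) (h : i < n)
    (h2 : n ≤ s.length) : ∀ y ∈ (s.take n).drop (i+1), s.getD i 0 ≤ y := by
  have hpw := pvDT_sorted s hs n i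
  rw [pvTake_cons s n i h h2] at hpw
  exact (List.pairwise_cons.1 hpw).1

lemma pvDrop_cons (R : List Int) (hi : Nat) (h : hi < R.length) :
    R.drop hi = R.getD hi 0 :: R.drop (hi+1) := by
  rw [List.drop_eq_getElem_cons h]
  congr 1
  rw [List.getD_eq_getElem?_getD, List.getElem?_eq_getElem h]
  rfl

lemma pvDrop_append (R : List Int) (hi : Nat) (v : Int) (h : hi ≤ R.length) :
    (R ++ [v]).drop hi = R.drop hi ++ [v] :=
  List.drop_append_of_le_length h

lemma pvHA_good (s : List Int) (N : Nat) (k : Int) (hs : s.Pairwise (· ≤ ·)) (hk : 0 < k)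
    (h2N : 2*N ≤ s.length) :
    ∀ (fuel : Nat) (R : List Int) (lo hi idx : Nat),
      lo = R.length → hi ≤ lo → lo ≤ N → idx = lo + hi → 2*N ≤ fuel + idx →
      (∀ v ∈ R.drop hi, 0 < v) →
      (∀ v ∈ R.drop hi, ∀ y ∈ (s.take (2*N)).drop idx, v ≤ y + k) →
      (R.drop hi).Pairwise (· ≤ ·) →
      pvHelperA s N k fuel (R ++ List.replicate (N - lo) 0) lo hi idx
        = pvGreedyB k (R.drop hi) R ((s.take (2*N)).drop idx) := by
  intro fuel
  induction fuel with
  | zero =>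
    intro R lo hi idx hloR hhilo hloN hidx hfuel hposP hbdP hpwP
    subst hloR
    have hidx2 : idx = 2*N := by omega
    have hlo : R.length = N := by omega
    have hhi : hi = N := by omega
    have hdropR : R.drop hi = [] := by rw [hhi, ← hlo]; exact List.drop_length
    have hdropS : (s.take (2*N)).drop idx = [] :=
      List.drop_eq_nil_of_le (by rw [List.length_take, hidx2]; exact min_le_left _ _)
    rw [hdropR, hdropS]
    simp only [pvHelperA]
    rw [if_pos hidx2]
    simp only [pvGreedyB]
    rw [hlo, Nat.sub_self]
    simp
  | succ fuel ih =>
    intro R lo hi idx hloR hhilo hloN hidx hfuel hposP hbdP hpwP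
    subst hloR
    by_cases hidx2 : idx = 2*N
    · have hlo : R.length = N := by omega
      have hhi : hi = N := by omega
      have hdropR : R.drop hi = [] := by rw [hhi, ← hlo]; exact List.drop_length
      have hdropS : (s.take (2*N)).drop idx = [] :=
        List.drop_eq_nil_of_le (by rw [List.length_take, hidx2]; exact min_le_left _ _)
      rw [hdropR, hdropS]
      simp only [pvHelperA]
      rw [if_pos hidx2]
      simp only [pvGreedyB]
      rw [hlo, Nat.sub_self]
      simp
    · have hidxlt : idx < 2*N := by omega
      have hxcons : (s.take (2*N)).drop idx
          = s.getD idx 0 :: (s.take (2*N)).drop (idx+1) := pvTake_cons s (2*N) idx hidxlt h2N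
      have hresLo : (R ++ List.replicate (N - R.length) (0:Int)).getD R.length 0 = 0 :=
        pvResZero R N R.length (le_refl _)
      have hreslen : (R ++ List.replicate (N - R.length) (0:Int)).length = N :=
        pvResLen R N hloN
      have hg1 : ¬(R.length < N ∧ 0 < s.getD idx 0 + k
          ∧ (R ++ List.replicate (N - R.length) (0:Int)).getD R.length 0 = s.getD idx 0 + k) := by
        rintro ⟨_, h2, h3⟩
        rw [hresLo] at h3; omega
      have hxmem : s.getD idx 0 ∈ (s.take (2*N)).drop idx := by rw [hxcons]; simp
      have hmem'' : ∀ y ∈ (s.take (2*N)).drop (idx+1), y ∈ (s.take (2*N)).drop idx := by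
        intro y hy; rw [hxcons]; simp [hy]
      have hxle' : ∀ y ∈ (s.take (2*N)).drop (idx+1), s.getD idx 0 ≤ y :=
        pvHead_le s hs (2*N) idx hidxlt h2N
      rcases Nat.lt_or_ge hi R.length with hhilt | hhige
      · -- pending queue nonempty
        have hpcons : R.drop hi = R.getD hi 0 :: R.drop (hi+1) := pvDrop_cons R hi hhilt
        have hp_pos : 0 < R.getD hi 0 := hposP _ (by rw [hpcons]; simp)
        have hresHi : (R ++ List.replicate (N - R.length) (0:Int)).getD hi 0 = R.getD hi 0 :=
          pvResR R N hi hhilt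
        have hhiN : hi < N := by omega
        have hmemtail : ∀ v ∈ R.drop (hi+1), v ∈ R.drop hi := by
          intro v hv; rw [hpcons]; simp [hv]
        -- shared facts for the push state
        have hpush_pos : 0 < s.getD idx 0 + k →
            ∀ v ∈ R.drop hi ++ [s.getD idx 0 + k], 0 < v := by
          intro hpl v hv
          rcases List.mem_append.1 hv with h | h
          · exact hposP v h
          · rw [List.mem_singleton] at h; omega
        have hpush_bd : ∀ v ∈ R.drop hi ++ [s.getD idx 0 + k],
            ∀ y ∈ (s.take (2*N)).drop (idx+1), v ≤ y + k := by
          intro v hv y hy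
          rcases List.mem_append.1 hv with h | h
          · exact hbdP v h y (hmem'' y hy)
          · rw [List.mem_singleton] at h; subst h
            have := hxle' y hy; omega
        have hpush_pw : (R.drop hi ++ [s.getD idx 0 + k]).Pairwise (· ≤ ·) :=
          pvPW_append_singleton hpwP (fun v hv => hbdP v hv _ hxmem)
        by_cases hmatch : R.getD hi 0 = s.getD idx 0 - k
        · -- branch 2 fires: match the pending front
          have hg2 : (hi < N ∧ 0 < s.getD idx 0 - k
              ∧ (R ++ List.replicate (N - R.length) (0:Int)).getD hi 0 = s.getD idx 0 - k) :=
            ⟨hhiN, by omega, by rw [hresHi, hmatch]⟩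
          have hIH2 := ih R (R.length) (hi+1) (idx+1) rfl (by omega) hloN (by omega) (by omega)
            (fun v hv => hposP v (hmemtail v hv))
            (fun v hv y hy => hbdP v (hmemtail v hv) y (hmem'' y hy))
            (by rw [hpcons] at hpwP; exact (List.pairwise_cons.1 hpwP).2)
          have hRHS : pvGreedyB k (R.drop hi) R ((s.take (2*N)).drop idx)
              = pvGreedyB k (R.drop (hi+1)) R ((s.take (2*N)).drop (idx+1)) := by
            rw [hxcons, hpcons]
            simp only [pvGreedyB]
            rw [if_pos hmatch]
          rw [hRHS]
          cases hval : pvGreedyB k (R.drop (hi+1)) R ((s.take (2*N)).drop (idx+1)) with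
          | some r =>
            simp only [pvHelperA]
            rw [if_neg hidx2, if_neg hg1, if_pos hg2, hIH2, hval]
          | none =>
            simp only [pvHelperA]
            rw [if_neg hidx2, if_neg hg1, if_pos hg2, hIH2, hval]
            have hg4 : ¬(hi < N
                ∧ (R ++ List.replicate (N - R.length) (0:Int)).getD hi 0 = 0
                ∧ 0 < s.getD idx 0 - k) := by
              rintro ⟨_, h2, _⟩; rw [hresHi] at h2; omega
            rw [if_neg hg4]
            by_cases hlo2 : R.length < N
            · have hpl : 0 < s.getD idx 0 + k := by omega
              have hg3 : (R.length < N
                  ∧ (R ++ List.replicate (N - R.length) (0:Int)).getD R.length 0 = 0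
                  ∧ 0 < s.getD idx 0 + k) := ⟨hlo2, hresLo, hpl⟩
              rw [if_pos hg3, pvResSet R N hlo2 _]
              have hIH3 := ih (R ++ [s.getD idx 0 + k]) (R.length + 1) hi (idx+1)
                (by simp) (by omega) (by omega) (by omega) (by omega)
                (by rw [pvDrop_append R hi _ (by omega)]; exact hpush_pos hpl)
                (by rw [pvDrop_append R hi _ (by omega)]; exact hpush_bd)
                (by rw [pvDrop_append R hi _ (by omega)]; exact hpush_pw)
              rw [hIH3]
              -- the push-run must fail too, by the exchange lemma
              cases hv2 : pvGreedyB k ((R ++ [s.getD idx 0 + k]).drop hi) (R ++ [s.getD idx 0 + k])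
                  ((s.take (2*N)).drop (idx+1)) with
              | none => rfl
              | some r2 =>
                exfalso
                have hisSome : (pvGreedyB k
                    (R.getD hi 0 :: (R.drop (hi+1) ++ (R.getD hi 0 + 2*k) :: []))
                    (R ++ [s.getD idx 0 + k]) ((s.take (2*N)).drop (idx+1))).isSome = true := by
                  have hshape : (R ++ [s.getD idx 0 + k]).drop hi
                      = R.getD hi 0 :: (R.drop (hi+1) ++ (R.getD hi 0 + 2*k) :: []) := by
                    rw [pvDrop_append R hi _ (by omega), hpcons,
                      show s.getD idx 0 + k = R.getD hi 0 + 2*k by omega]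
                    rfl
                  rw [← hshape, hv2]
                  rfl
                have hcontra := pvGB_sim k hk ((s.take (2*N)).drop (idx+1))
                  (pvDT_sorted s hs (2*N) (idx+1)) (R.getD hi 0) (R.drop (hi+1)) []
                  (R ++ [s.getD idx 0 + k]) R ?_ ?_ ?_ hisSome
                · rw [List.append_nil] at hcontra
                  rw [hval] at hcontra
                  simp at hcontra
                · have h := hpush_pw
                  rw [hpcons, show s.getD idx 0 + k = R.getD hi 0 + 2*k by omega] at h
                  exact h
                · intro v hv
                  have h := hpush_pos hpl v
                  rw [hpcons, show s.getD idx 0 + k = R.getD hi 0 + 2*k by omega] at h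
                  exact h hv
                · intro v hv y hy
                  have h := hpush_bd v
                  rw [hpcons, show s.getD idx 0 + k = R.getD hi 0 + 2*k by omega] at h
                  exact h hv y hy
            · have hg3 : ¬(R.length < N
                  ∧ (R ++ List.replicate (N - R.length) (0:Int)).getD R.length 0 = 0
                  ∧ 0 < s.getD idx 0 + k) := by rintro ⟨h1, _, _⟩; omega
              rw [if_neg hg3]
        · -- front does not match
          have hg2 : ¬(hi < N ∧ 0 < s.getD idx 0 - k
              ∧ (R ++ List.replicate (N - R.length) (0:Int)).getD hi 0 = s.getD idx 0 - k) := by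
            rintro ⟨_, _, h3⟩; rw [hresHi] at h3; exact hmatch h3
          have hg4 : ¬(hi < N
              ∧ (R ++ List.replicate (N - R.length) (0:Int)).getD hi 0 = 0
              ∧ 0 < s.getD idx 0 - k) := by
            rintro ⟨_, h2, _⟩; rw [hresHi] at h2; omega
          have hRHS : pvGreedyB k (R.drop hi) R ((s.take (2*N)).drop idx)
              = if 0 < s.getD idx 0 + k then
                  pvGreedyB k (R.drop hi ++ [s.getD idx 0 + k]) (R ++ [s.getD idx 0 + k])
                    ((s.take (2*N)).drop (idx+1))
                else none := by
            rw [hxcons, hpcons]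
            simp only [pvGreedyB]
            rw [if_neg hmatch]
            rfl
          rw [hRHS]
          by_cases hpl : 0 < s.getD idx 0 + k
          · rw [if_pos hpl]
            by_cases hlo2 : R.length < N
            · have hg3 : (R.length < N
                  ∧ (R ++ List.replicate (N - R.length) (0:Int)).getD R.length 0 = 0
                  ∧ 0 < s.getD idx 0 + k) := ⟨hlo2, hresLo, hpl⟩
              have hIH3 := ih (R ++ [s.getD idx 0 + k]) (R.length + 1) hi (idx+1)
                (by simp) (by omega) (by omega) (by omega) (by omega)
                (by rw [pvDrop_append R hi _ (by omega)]; exact hpush_pos hpl)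
                (by rw [pvDrop_append R hi _ (by omega)]; exact hpush_bd)
                (by rw [pvDrop_append R hi _ (by omega)]; exact hpush_pw)
              rw [pvDrop_append R hi _ (by omega)] at hIH3
              cases hval : pvGreedyB k (R.drop hi ++ [s.getD idx 0 + k]) (R ++ [s.getD idx 0 + k])
                  ((s.take (2*N)).drop (idx+1)) with
              | some r =>
                simp only [pvHelperA]
                rw [if_neg hidx2, if_neg hg1, if_neg hg2, if_pos hg3, pvResSet R N hlo2 _,
                  hIH3, hval]
              | none =>
                simp only [pvHelperA]
                rw [if_neg hidx2, if_neg hg1, if_neg hg2, if_pos hg3, pvResSet R N hlo2 _,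
                  hIH3, hval, if_neg hg4]
            · have hg3 : ¬(R.length < N
                  ∧ (R ++ List.replicate (N - R.length) (0:Int)).getD R.length 0 = 0
                  ∧ 0 < s.getD idx 0 + k) := by rintro ⟨h1, _, _⟩; omega
              simp only [pvHelperA]
              rw [if_neg hidx2, if_neg hg1, if_neg hg2, if_neg hg3, if_neg hg4]
              rw [pvGB_none_of_long k _ _ _ ?_]
              have hlen1 : ((s.take (2*N)).drop (idx+1)).length = 2*N - (idx+1) :=
                pvDT_len s (2*N) (idx+1) h2N
              have hlen2 : (R.drop hi ++ [s.getD idx 0 + k]).length = R.length - hi + 1 := by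
                simp
              rw [hlen1, hlen2]
              omega
          · rw [if_neg hpl]
            have hg3 : ¬(R.length < N
                ∧ (R ++ List.replicate (N - R.length) (0:Int)).getD R.length 0 = 0
                ∧ 0 < s.getD idx 0 + k) := by rintro ⟨_, _, h3⟩; omega
            simp only [pvHelperA]
            rw [if_neg hidx2, if_neg hg1, if_neg hg2, if_neg hg3, if_neg hg4]
      · -- pending queue empty: hi = R.length
        have hieq : hi = R.length := by omega
        subst hieq
        have hpendnil : R.drop R.length = [] := List.drop_length
        have hloNlt : R.length < N := by omega
        have hg2 : ¬(R.length < N ∧ 0 < s.getD idx 0 - k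
            ∧ (R ++ List.replicate (N - R.length) (0:Int)).getD R.length 0 = s.getD idx 0 - k) := by
          rintro ⟨_, h2, h3⟩; rw [hresLo] at h3; omega
        have hRHS : pvGreedyB k (R.drop R.length) R ((s.take (2*N)).drop idx)
            = if 0 < s.getD idx 0 + k then
                pvGreedyB k [s.getD idx 0 + k] (R ++ [s.getD idx 0 + k])
                  ((s.take (2*N)).drop (idx+1))
              else none := by
          rw [hxcons, hpendnil]
          simp only [pvGreedyB]
        rw [hRHS]
        by_cases hpl : 0 < s.getD idx 0 + k
        · rw [if_pos hpl]
          have hg3 : (R.length < N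
              ∧ (R ++ List.replicate (N - R.length) (0:Int)).getD R.length 0 = 0
              ∧ 0 < s.getD idx 0 + k) := ⟨hloNlt, hresLo, hpl⟩
          have hIH3 := ih (R ++ [s.getD idx 0 + k]) (R.length + 1) R.length (idx+1)
            (by simp) (by omega) (by omega) (by omega) (by omega)
            (by
              rw [pvDrop_append R R.length _ (le_refl _), hpendnil, List.nil_append]
              intro v hv; rw [List.mem_singleton] at hv; omega)
            (by
              rw [pvDrop_append R R.length _ (le_refl _), hpendnil, List.nil_append]
              intro v hv y hy; rw [List.mem_singleton] at hv; subst hv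
              have := hxle' y hy; omega)
            (by
              rw [pvDrop_append R R.length _ (le_refl _), hpendnil]
              simp)
          rw [pvDrop_append R R.length _ (le_refl _), hpendnil] at hIH3
          rw [List.nil_append] at hIH3
          cases hval : pvGreedyB k [s.getD idx 0 + k] (R ++ [s.getD idx 0 + k])
              ((s.take (2*N)).drop (idx+1)) with
          | some r =>
            simp only [pvHelperA]
            rw [if_neg hidx2, if_neg hg1, if_neg hg2, if_pos hg3, pvResSet R N hloNlt _,
              hIH3, hval]
          | none =>
            simp only [pvHelperA]
            rw [if_neg hidx2, if_neg hg1, if_neg hg2, if_pos hg3, pvResSet R N hloNlt _,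
              hIH3, hval]
            by_cases hph : 0 < s.getD idx 0 - k
            · have hg4 : (R.length < N
                  ∧ (R ++ List.replicate (N - R.length) (0:Int)).getD R.length 0 = 0
                  ∧ 0 < s.getD idx 0 - k) := ⟨hloNlt, hresLo, hph⟩
              rw [if_pos hg4]
              exact pvHA_bad s N k hs hk h2N fuel _ R.length (R.length + 1) (idx+1)
                (by simp; omega) (by omega) (by omega) (by omega)
                (fun m hm1 hm2 => by
                  have hmeq : m = R.length := by omega
                  subst hmeq
                  rw [pvSet_getD_self _ _ _ _ (by omega)]
                  exact ⟨by omega, idx, by omega, by omega, rfl⟩)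
                (fun m hm1 hm2 => by
                  rw [pvSet_getD_ne _ _ _ _ _ (by omega)]
                  exact pvResZero R N m (by omega))
            · have hg4 : ¬(R.length < N
                  ∧ (R ++ List.replicate (N - R.length) (0:Int)).getD R.length 0 = 0
                  ∧ 0 < s.getD idx 0 - k) := by rintro ⟨_, _, h3⟩; omega
              rw [if_neg hg4]
        · rw [if_neg hpl]
          have hg3 : ¬(R.length < N
              ∧ (R ++ List.replicate (N - R.length) (0:Int)).getD R.length 0 = 0
              ∧ 0 < s.getD idx 0 + k) := by rintro ⟨_, _, h3⟩; omega
          have hg4 : ¬(R.length < N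
              ∧ (R ++ List.replicate (N - R.length) (0:Int)).getD R.length 0 = 0
              ∧ 0 < s.getD idx 0 - k) := by rintro ⟨_, _, h3⟩; omega
          simp only [pvHelperA]
          rw [if_neg hidx2, if_neg hg1, if_neg hg2, if_neg hg3, if_neg hg4]
lemma pvRepSet_getD_zero (N : Nat) (v d : Int) (hN : 0 < N) :
    ((List.replicate N (0:Int)).set 0 v).getD 0 d = v :=
  pvSet_getD_self _ _ _ _ (by simp; omega)

lemma pvRepSet_getD_pos (N m : Nat) (v : Int) (hm : 0 < m) (hmN : m < N) :
    ((List.replicate N (0:Int)).set 0 v).getD m 0 = 0 := by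
  rw [pvSet_getD_ne _ _ _ _ _ (by omega)]
  simp [List.getD_eq_getElem?_getD, hmN]

lemma pvLoop_eq (s : List Int) (N : Nat) (hs : s.Pairwise (· ≤ ·)) (h2N : 2*N ≤ s.length)
    (hq : ∀ i : Nat, i < 2*N → ¬(s.getD 0 0 < 0 ∧ s.getD i 0 = - s.getD 0 0)) :
    ∀ (is : List Int), (∀ i ∈ is, 1 ≤ i ∧ i < ((2*N : Nat) : Int)) →
      pvLoopA s N is = pvLoopB s (2*N) is := by
  intro is
  induction is with
  | nil => intro _; rfl
  | cons i rest ihl =>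
    intro hmem
    obtain ⟨hi1, hi2⟩ := hmem i (by simp)
    have hrest : ∀ j ∈ rest, 1 ≤ j ∧ j < ((2*N : Nat) : Int) := fun j hj => hmem j (by simp [hj])
    have hN1 : 1 ≤ N := by omega
    have hiN : i.toNat < 2*N := by omega
    have hilen : i < (s.length : Int) := by
      have : ((2*N : Nat) : Int) ≤ (s.length : Int) := by exact_mod_cast h2N
      omega
    have hgi : PySem.List.pyGetD s i 0 = s.getD i.toNat 0 := by
      rw [PySem.List.pyGetD_eq_getElem s 0 (by omega) hilen, List.getD_eq_getElem?_getD,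
        List.getElem?_eq_getElem (by omega : i.toNat < s.length)]
      rfl
    have hg0 : PySem.List.pyGetD s 0 0 = s.getD 0 0 := PySem.List.pyGetD_zero s 0
    simp only [pvLoopA, pvLoopB]
    set kk := PySem.Int.floordiv (PySem.List.pyGetD s i 0 - PySem.List.pyGetD s 0 0) 2 with hkk
    by_cases hc : PySem.Int.mod (PySem.List.pyGetD s i 0 - PySem.List.pyGetD s 0 0) 2 = 0
        ∧ 0 < kk
    · obtain ⟨hr, hkpos⟩ := hc
      have hd : PySem.List.pyGetD s i 0 - PySem.List.pyGetD s 0 0 = kk * 2 := by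
        have h := PySem.Int.floordiv_mul_add_mod
          (PySem.List.pyGetD s i 0 - PySem.List.pyGetD s 0 0) 2
        omega
      rcases lt_trichotomy (PySem.List.pyGetD s 0 0 + kk) 0
        with hneg | hzero | hposk
      · -- A's helper fails outright (negative first slot); B skips the candidate
        rw [if_pos ⟨hr, hkpos⟩, if_neg (by rintro ⟨_, _, h3⟩; omega)]
        rw [pvHA_neg s N _ (2*N) _ 1 1 (by simp) hN1 (le_refl _) hN1 rfl
          (by rw [pvRepSet_getD_zero N _ 0 (by omega)]; exact hneg)
          (fun m hm1 hm2 => pvRepSet_getD_pos N m _ (by omega) hm2)]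
        exact ihl hrest
      · exfalso
        have hs0neg : s.getD 0 0 < 0 := by rw [hg0] at hzero; omega
        refine hq i.toNat hiN ⟨hs0neg, ?_⟩
        rw [hgi, hg0] at hd
        rw [hg0] at hzero
        omega
      · -- both run: A's backtracker equals B's greedy
        rw [if_pos ⟨hr, hkpos⟩, if_pos ⟨hr, hkpos, hposk⟩]
        have hres0 : (List.replicate N (0:Int)).set 0 (PySem.List.pyGetD s 0 0 + kk)
            = [PySem.List.pyGetD s 0 0 + kk] ++ List.replicate (N - 1) 0 := by
          rw [show N = (N-1)+1 by omega, List.replicate_succ]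
          rfl
        have hgood := pvHA_good s N kk hs hkpos h2N (2*N)
          [PySem.List.pyGetD s 0 0 + kk]
          1 0 1 (by simp) (by omega) hN1 rfl (by omega)
          (by
            intro v hv
            rw [List.drop_zero, List.mem_singleton] at hv
            omega)
          (by
            intro v hv y hy
            rw [List.drop_zero, List.mem_singleton] at hv
            subst hv
            have hle := pvHead_le s hs (2*N) 0 (by omega) h2N y hy
            rw [hg0]
            omega)
          (by rw [List.drop_zero]; exact List.pairwise_singleton _ _)
        rw [List.drop_zero] at hgood
        rw [hres0, hgood]
        cases hval : pvGreedyB kk [PySem.List.pyGetD s 0 0 + kk] [PySem.List.pyGetD s 0 0 + kk]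
            ((s.take (2*N)).drop 1) with
        | some r => rfl
        | none => exact ihl hrest
    · rw [if_neg hc, if_neg (fun h => hc ⟨h.1, h.2.1⟩)]
      exact ihl hrest

theorem pvFinal : ∀ (nums : List Int), (∀ x ∈ nums, x < 0 → (∀ y ∈ nums, x ≤ y) → (-x) ∉ nums) →
    recoverArray nums = recoverArray_alt nums := by
  intro nums hpre
  unfold recoverArray recoverArray_alt
  have hs : (PySem.List.sorted nums (fun x => x) false).Pairwise (· ≤ ·) :=
    PySem.List.sorted_pairwise nums (fun x => x)
  set s := PySem.List.sorted nums (fun x => x) false with hsdef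
  have h2N : 2*(s.length/2) ≤ s.length := by omega
  have hq : ∀ i : Nat, i < 2*(s.length/2) → ¬(s.getD 0 0 < 0 ∧ s.getD i 0 = - s.getD 0 0) := by
    rintro i hiN ⟨hneg, heq⟩
    have hlen0 : 0 < s.length := by omega
    have hmem0 : s.getD 0 0 ∈ nums := by
      have h : s.getD 0 0 ∈ s := by
        rw [List.getD_eq_getElem?_getD, List.getElem?_eq_getElem hlen0]
        exact List.getElem_mem _
      rw [hsdef] at h
      exact (PySem.List.mem_sorted _ _ _ _).1 h
    have hmin : ∀ y ∈ nums, s.getD 0 0 ≤ y := by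
      intro y hy
      have hys : y ∈ s := by rw [hsdef]; exact (PySem.List.mem_sorted _ _ _ _).2 hy
      obtain ⟨j, hj, rfl⟩ := List.mem_iff_getElem.1 hys
      rcases Nat.eq_zero_or_pos j with rfl | hj0
      · rw [List.getD_eq_getElem?_getD, List.getElem?_eq_getElem hlen0]
        exact le_refl _
      · rw [List.getD_eq_getElem?_getD, List.getElem?_eq_getElem hlen0]
        exact List.pairwise_iff_getElem.1 hs 0 j hlen0 hj hj0
    refine hpre (s.getD 0 0) hmem0 hneg hmin ?_
    rw [← heq]
    have h : s.getD i 0 ∈ s := by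
      rw [List.getD_eq_getElem?_getD, List.getElem?_eq_getElem (by omega : i < s.length)]
      exact List.getElem_mem _
    rw [hsdef] at h
    exact (PySem.List.mem_sorted _ _ _ _).1 h
  exact pvLoop_eq s (s.length/2) hs h2N hq _
    (fun i hi => PySem.List.mem_pyRange_one.1 hi)

-- ===== VERDICT (by name: the statement is the Claim_ definition above) =====
theorem recoverArray_spec : Claim_equal_recoverArray := by
  intro nums _ hpre
  show recoverArray nums = recoverArray_alt nums
  exact pvFinal nums hpre
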